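-- pv_equiv track=rewrite | github.com/uclnlp/jack | quebap/io/scienceQA2quebap.py | transSent
-- ===== SOURCE A (Python) =====
-- def transSent(s, vocab):
--     mincnt = 5
--     last_bigram = False
--     delimiter = "_"
--     new_s = []
--     for word_a, word_b in zip(s, s[1:]):
--         bigram_word = delimiter.join((word_a, word_b))
--         if bigram_word in vocab and vocab[bigram_word] >= mincnt and not last_bigram:
--             new_s.append(bigram_word)
--             last_bigram = True
--             continue
--
--         if not last_bigram:
--             new_s.append(word_a)
--         last_bigram = False
--
--     if s:  # add last word skipped by previous loop
--         last_token = s[-1]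
--         if not last_bigram:
--             new_s.append(last_token)
--
--     return new_s
-- ===== SOURCE B (Python) =====
-- def transSent(s, vocab):
--     mincnt = 5
--     delimiter = "_"
--     new_s = []
--     i = 0
--     while i < len(s):
--         if i + 1 < len(s):
--             bigram_word = delimiter.join((s[i], s[i + 1]))
--             if bigram_word in vocab and vocab[bigram_word] >= mincnt:
--                 new_s.append(bigram_word)
--                 i += 2
--                 continue
--         new_s.append(s[i])
--         i += 1
--     return new_s
-- ===== Notes on version B (the rewrite author's own statement) =====
-- stated objective: simpler
-- what changed: Replaces the zip-over-adjacent-pairs loop with a last_bigram state flag plus a separate trailing-token fix-up by a single index-cursor while-loop that looks one token ahead and advances by 2 after a merge and by 1 otherwise.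
import Mathlib
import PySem

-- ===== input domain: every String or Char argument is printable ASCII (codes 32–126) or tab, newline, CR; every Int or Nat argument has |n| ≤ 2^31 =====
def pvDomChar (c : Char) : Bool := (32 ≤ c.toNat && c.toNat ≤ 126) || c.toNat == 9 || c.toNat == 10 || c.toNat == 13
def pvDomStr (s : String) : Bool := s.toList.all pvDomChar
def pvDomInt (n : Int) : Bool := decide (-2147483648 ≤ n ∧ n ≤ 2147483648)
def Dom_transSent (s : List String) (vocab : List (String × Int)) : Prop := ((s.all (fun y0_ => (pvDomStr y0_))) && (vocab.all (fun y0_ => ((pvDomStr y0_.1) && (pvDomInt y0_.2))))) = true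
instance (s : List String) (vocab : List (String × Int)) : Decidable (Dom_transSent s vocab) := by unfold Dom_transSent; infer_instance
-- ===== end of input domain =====

-- B replaces A's pair-zip loop with a `last_bigram` flag and trailing-token fix-up by a
-- single look-ahead cursor loop (merge → advance 2, else emit token → advance 1); same output.

-- ===== PORT A =====
-- loop body of A: state is (last_bigram, new_s); one step per adjacent pair (word_a, word_b).
def transSentStep (vocab : List (String × Int))
    (st : Bool × List String) (p : String × String) : Bool × List String :=
  let bigram_word := PySem.Str.join "_" [p.1, p.2]
  match (PySem.Dict.mk vocab).get? bigram_word with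
  | some c =>
      if c ≥ 5 ∧ st.1 = false then (true, st.2 ++ [bigram_word])
      else (false, if st.1 = false then st.2 ++ [p.1] else st.2)
  | none => (false, if st.1 = false then st.2 ++ [p.1] else st.2)

def transSent (s : List String) (vocab : List (String × Int)) : List String :=
  let st := (s.zip s.tail).foldl (transSentStep vocab) (false, [])
  -- `if s: last_token = s[-1]; if not last_bigram: new_s.append(last_token)`:
  -- s[-1] on a nonempty list is its last element (getLast?).
  match s.getLast? with
  | some last_token => if st.1 = false then st.2 ++ [last_token] else st.2
  | none => st.2

-- ===== PORT B =====
-- the cursor while-loop of Source B as structural recursion: the position i is the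
-- remaining suffix s[i:]; merge → drop two tokens, otherwise → drop one.
def transSent_alt (s : List String) (vocab : List (String × Int)) : List String :=
  match s with
  | [] => []
  | [x] => [x]
  | x :: y :: rest =>
      let bigram_word := PySem.Str.join "_" [x, y]
      match (PySem.Dict.mk vocab).get? bigram_word with
      | some c =>
          if c ≥ 5 then bigram_word :: transSent_alt rest vocab
          else x :: transSent_alt (y :: rest) vocab
      | none => x :: transSent_alt (y :: rest) vocab

-- ===== PRECONDITION & SPEC =====
def Spec_transSent (s : List String) (vocab : List (String × Int)) (out : List String) : Prop := out = transSent_alt s vocab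
instance (s : List String) (vocab : List (String × Int)) (out : List String) : Decidable (Spec_transSent s vocab out) := by unfold Spec_transSent; infer_instance

-- ===== CLAIM (what is proved, stated in full; the proofs are below) =====
def Claim_equal_transSent : Prop := ∀ (s : List String) (vocab : List (String × Int)), Dom_transSent s vocab → Spec_transSent s vocab (transSent s vocab)

-- ===== LEMMAS AND PROOFS =====

-- A's loop-plus-fixup, starting from an arbitrary accumulator/flag.
def runA (vocab : List (String × Int)) (s : List String) (flag : Bool) (acc : List String) : List String :=
  let st := (s.zip s.tail).foldl (transSentStep vocab) (flag, acc)
  match s.getLast? with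
  | some last_token => if st.1 = false then st.2 ++ [last_token] else st.2
  | none => st.2

theorem runA_cons2 (vocab : List (String × Int)) (x y : String) (rest : List String)
    (flag : Bool) (acc : List String) :
    runA vocab (x :: y :: rest) flag acc
      = runA vocab (y :: rest) (transSentStep vocab (flag, acc) (x, y)).1
          (transSentStep vocab (flag, acc) (x, y)).2 := by
  unfold runA
  simp only [List.tail_cons, List.zip_cons_cons, List.foldl_cons, List.getLast?_cons_cons]

theorem step_true (vocab : List (String × Int)) (x y : String) (acc : List String) :
    transSentStep vocab (true, acc) (x, y) = (false, acc) := by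
  unfold transSentStep
  cases hG : (PySem.Dict.mk vocab).get? (PySem.Str.join "_" [x, y]) <;> simp [hG]

theorem step_false_pos (vocab : List (String × Int)) (x y : String) (acc : List String)
    (c : Int) (hG : (PySem.Dict.mk vocab).get? (PySem.Str.join "_" [x, y]) = some c)
    (hc : c ≥ 5) :
    transSentStep vocab (false, acc) (x, y) = (true, acc ++ [PySem.Str.join "_" [x, y]]) := by
  unfold transSentStep
  simp [hG, hc]

theorem step_false_neg (vocab : List (String × Int)) (x y : String) (acc : List String)
    (hm : ∀ c, (PySem.Dict.mk vocab).get? (PySem.Str.join "_" [x, y]) = some c → ¬ c ≥ 5) :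
    transSentStep vocab (false, acc) (x, y) = (false, acc ++ [x]) := by
  unfold transSentStep
  cases hG : (PySem.Dict.mk vocab).get? (PySem.Str.join "_" [x, y]) with
  | some c => simp [hG, hm c hG]
  | none => simp [hG]

theorem runA_key (vocab : List (String × Int)) :
    ∀ n (s : List String) (acc : List String), s.length ≤ n →
      (runA vocab s false acc = acc ++ transSent_alt s vocab) ∧
      (s ≠ [] → runA vocab s true acc = acc ++ transSent_alt s.tail vocab) := by
  intro n
  induction n with
  | zero =>
      intro s acc h
      have hs : s = [] := List.eq_nil_of_length_eq_zero (Nat.le_zero.mp h)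
      subst hs
      exact ⟨by simp [runA, transSent_alt], fun h => absurd rfl h⟩
  | succ n ih =>
      intro s acc h
      match s with
      | [] => exact ⟨by simp [runA, transSent_alt], fun h => absurd rfl h⟩
      | [x] =>
          refine ⟨by simp [runA, transSent_alt], fun _ => by simp [runA, transSent_alt]⟩
      | x :: y :: rest =>
          have hlen : (y :: rest).length ≤ n := by
            simp at h ⊢; omega
          constructor
          · rw [runA_cons2]
            cases hG : (PySem.Dict.mk vocab).get? (PySem.Str.join "_" [x, y]) with
            | some c =>
                by_cases hc : c ≥ 5
                · rw [step_false_pos vocab x y acc c hG hc]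
                  show runA vocab (y :: rest) true (acc ++ [PySem.Str.join "_" [x, y]])
                      = acc ++ transSent_alt (x :: y :: rest) vocab
                  have := (ih (y :: rest) (acc ++ [PySem.Str.join "_" [x, y]]) hlen).2 (by simp)
                  simp only [List.tail_cons] at this
                  rw [this]
                  simp [transSent_alt, hG, hc]
                · have hm : ∀ c', (PySem.Dict.mk vocab).get? (PySem.Str.join "_" [x, y]) = some c' → ¬ c' ≥ 5 := by
                    intro c' hc'
                    rw [hG] at hc'
                    cases hc'
                    exact hc
                  rw [step_false_neg vocab x y acc hm]
                  show runA vocab (y :: rest) false (acc ++ [x]) = acc ++ transSent_alt (x :: y :: rest) vocab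
                  rw [(ih (y :: rest) (acc ++ [x]) hlen).1]
                  simp [transSent_alt, hG, hc]
            | none =>
                have hm : ∀ c', (PySem.Dict.mk vocab).get? (PySem.Str.join "_" [x, y]) = some c' → ¬ c' ≥ 5 := by
                  intro c' hc'
                  rw [hG] at hc'
                  cases hc'
                rw [step_false_neg vocab x y acc hm]
                show runA vocab (y :: rest) false (acc ++ [x]) = acc ++ transSent_alt (x :: y :: rest) vocab
                rw [(ih (y :: rest) (acc ++ [x]) hlen).1]
                simp [transSent_alt, hG]
          · intro _
            rw [runA_cons2, step_true]
            show runA vocab (y :: rest) false acc = acc ++ transSent_alt (x :: y :: rest).tail vocab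
            rw [(ih (y :: rest) acc hlen).1]
            simp

-- ===== VERDICT (by name: the statement is the Claim_ definition above) =====
theorem transSent_spec : Claim_equal_transSent := by
  intro s vocab _
  show transSent s vocab = transSent_alt s vocab
  have hr : transSent s vocab = runA vocab s false [] := rfl
  rw [hr]
  simpa using (runA_key vocab s.length s [] le_rfl).1
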